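-- pv_equiv track=rewrite | github.com/samster024/USRP_Streaming_Python | CreateMax2871Packets.py | Max2870_Reg0
-- ===== SOURCE A (Python) =====
-- def Max2870_Reg0(Constant_Register0, Destination_Value, Packet7):
--
--     Element_1 = []
--     Element_4 = []
--     Element_5 = []
--     Element_6 = []
--
--     if Constant_Register0[0] == True:
--         Element_1.append(True)
--     else:
--         Element_1.append(False)
--
--     Element_2_Temp = []
--     Binary_18 = bin(Constant_Register0[1])[2:].zfill(16)
--     Str_Binary_18 = [int(a) for a in str(Binary_18)]
--     Str_Binary_18_Rev = Str_Binary_18[::-1]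
--     for x in range(0, 16):
--         if Str_Binary_18_Rev[x] == 1:
--             Element_2_Temp.append(True)
--         else:
--             Element_2_Temp.append(False)
--     Element_2 = Element_2_Temp[::-1]
--
--     Element_3_Temp = []
--     Element_3_Temp1 = []
--     Binary_19 = bin(Constant_Register0[2])[2:].zfill(16)
--     Str_Binary_19 = [int(a) for a in str(Binary_19)]
--     Str_Binary_19_Rev = Str_Binary_19[::-1]
--     for x in range(0, 16):
--         if Str_Binary_19_Rev[x] == 1:
--             Element_3_Temp.append(True)
--         else:
--             Element_3_Temp.append(False)
--     for x in range(0, 12):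
--         Element_3_Temp1.append(Element_3_Temp[x])
--     Element_3 = Element_3_Temp1[::-1]
--
--     if Constant_Register0[3] == True:
--         Element_4.append(True)
--     else:
--         Element_4.append(False)
--
--     if Constant_Register0[4] == True:
--         Element_5.append(True)
--     else:
--         Element_5.append(False)
--
--     if Constant_Register0[5] == True:
--         Element_6.append(True)
--     else:
--         Element_6.append(False)
--
--     Element5 = Element_1 + Element_2 + Element_3 + Element_4 + Element_5 + Element_6
--
--     Element5_Bin = []
--     for x in range(0, 32):
--         if Element5[x] == True:
--             Element5_Bin.append(1)
--         else:
--             Element5_Bin.append(0)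
--     Element5_Num = ''.join(str(e) for e in Element5_Bin)
--     Element5_Value = int(Element5_Num, 2)
--
--     Packet7.append(Destination_Value)
--     Packet7.append(40)
--     Packet7.append(Element5_Value)
--     return (Packet7)
-- ===== SOURCE B (Python) =====
-- def Max2870_Reg0(Constant_Register0, Destination_Value, Packet7):
--     # Pack the six fields directly with shifts and masks (no binary-string machinery).
--     # Mutates Packet7 in place, exactly like the original.
--     r = Constant_Register0
--     value = ((1 if r[0] == True else 0) << 31) \
--           + ((r[1] % 0x10000) << 15) \
--           + ((r[2] % 0x1000) << 3) \
--           + ((1 if r[3] == True else 0) << 2) \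
--           + ((1 if r[4] == True else 0) << 1) \
--           + (1 if r[5] == True else 0)
--     Packet7.append(Destination_Value)
--     Packet7.append(40)
--     Packet7.append(value)
--     return Packet7
-- ===== Notes on version B (the rewrite author's own statement) =====
-- stated objective: simpler
-- what changed: Replaces the Boolean-list / binary-string round-trip (bin, zfill, per-bit list building, string join, int(,2)) with one arithmetic expression packing the six fields via shifts and masks.
import Mathlib
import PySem

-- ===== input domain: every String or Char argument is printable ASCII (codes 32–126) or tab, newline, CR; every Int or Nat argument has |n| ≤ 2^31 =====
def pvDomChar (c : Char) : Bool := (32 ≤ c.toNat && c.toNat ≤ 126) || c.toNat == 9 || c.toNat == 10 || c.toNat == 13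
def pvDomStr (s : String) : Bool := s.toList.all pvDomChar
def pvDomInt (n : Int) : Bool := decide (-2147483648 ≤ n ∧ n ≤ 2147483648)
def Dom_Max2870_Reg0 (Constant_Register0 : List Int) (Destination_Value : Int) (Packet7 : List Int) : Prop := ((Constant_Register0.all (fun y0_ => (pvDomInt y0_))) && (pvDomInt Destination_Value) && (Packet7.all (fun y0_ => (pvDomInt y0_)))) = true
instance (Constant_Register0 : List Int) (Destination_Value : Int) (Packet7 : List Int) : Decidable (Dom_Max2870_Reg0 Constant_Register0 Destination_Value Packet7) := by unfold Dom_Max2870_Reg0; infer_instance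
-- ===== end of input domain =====

-- B replaces A's Boolean-list / binary-string machinery with one shift-and-mask
-- arithmetic expression (objective: simpler).  Both A and B append to Packet7 in
-- place in Python; the equivalence proved here is about the returned list value.

-- ===== PORT A =====

-- bin(n)[2:] for n ≥ 0, as the list of binary digits, most significant first
-- (bin(0)[2:] = "0" is handled by pvPyBinDigits below); exact on Pre_'s
-- nonnegative field values, where A's ints reach bin().
def pvBinDigits : Nat → List Nat
  | 0 => []
  | (n+1) => pvBinDigits ((n+1)/2) ++ [(n+1) % 2]
decreasing_by exact Nat.div_lt_self (Nat.succ_pos n) one_lt_two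

def pvPyBinDigits (n : Nat) : List Nat := if n = 0 then [0] else pvBinDigits n

-- .zfill(16) on a digit string with no sign character
def pvZfill16 (l : List Nat) : List Nat := List.replicate (16 - l.length) 0 ++ l

def Max2870_Reg0 (Constant_Register0 : List Int) (Destination_Value : Int) (Packet7 : List Int) : List Int :=
  -- Element_1: [reg0[0] == True]
  let element1 : List Bool :=
    if PySem.List.pyGetD Constant_Register0 0 0 = 1 then [true] else [false]
  -- Binary_18 = bin(reg0[1])[2:].zfill(16); digits kept as the ints of
  -- [int(a) for a in str(Binary_18)]; then reversed
  let rev18 : List Nat :=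
    (pvZfill16 (pvPyBinDigits (PySem.List.pyGetD Constant_Register0 1 0).toNat)).reverse
  let element2Temp : List Bool :=
    (List.range 16).foldl
      (fun acc x => acc ++ (if rev18.getD x 0 = 1 then [true] else [false])) []
  let element2 := element2Temp.reverse
  -- same for reg0[2], then the first 12 entries, reversed
  let rev19 : List Nat :=
    (pvZfill16 (pvPyBinDigits (PySem.List.pyGetD Constant_Register0 2 0).toNat)).reverse
  let element3Temp : List Bool :=
    (List.range 16).foldl
      (fun acc x => acc ++ (if rev19.getD x 0 = 1 then [true] else [false])) []
  let element3Temp1 : List Bool :=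
    (List.range 12).foldl (fun acc x => acc ++ [element3Temp.getD x false]) []
  let element3 := element3Temp1.reverse
  let element4 : List Bool :=
    if PySem.List.pyGetD Constant_Register0 3 0 = 1 then [true] else [false]
  let element5' : List Bool :=
    if PySem.List.pyGetD Constant_Register0 4 0 = 1 then [true] else [false]
  let element6 : List Bool :=
    if PySem.List.pyGetD Constant_Register0 5 0 = 1 then [true] else [false]
  let element5 := element1 ++ element2 ++ element3 ++ element4 ++ element5' ++ element6
  let element5Bin : List Nat :=
    (List.range 32).foldl
      (fun acc x => acc ++ (if element5.getD x false = true then [1] else [0])) []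
  -- ''.join(str(e) for e in Element5_Bin) then int(_, 2): parse the 0/1 digit
  -- string back, MSB first — exact, every digit is '0' or '1'
  let element5Value : Nat := element5Bin.foldl (fun acc b => acc * 2 + b) 0
  Packet7 ++ [Destination_Value, 40, (element5Value : Int)]

-- ===== PORT B =====
def Max2870_Reg0_alt (Constant_Register0 : List Int) (Destination_Value : Int) (Packet7 : List Int) : List Int :=
  -- '1 if r[i] == True else 0' (int fields: == True ↔ == 1); 'x << k' = x * 2^k;
  -- Python '%' on ints = PySem.Int.mod
  let bit : Int → Int := fun i => if PySem.List.pyGetD Constant_Register0 i 0 = 1 then 1 else 0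
  let value : Int :=
    bit 0 * 2 ^ 31
    + PySem.Int.mod (PySem.List.pyGetD Constant_Register0 1 0) 65536 * 2 ^ 15
    + PySem.Int.mod (PySem.List.pyGetD Constant_Register0 2 0) 4096 * 2 ^ 3
    + bit 3 * 2 ^ 2 + bit 4 * 2 ^ 1 + bit 5
  Packet7 ++ [Destination_Value, 40, value]

-- ===== PRECONDITION & SPEC =====
-- Pre_ excludes exactly the inputs where A raises: fewer than 6 register fields
-- (IndexError) or a negative fields[1]/fields[2] (ValueError: bin() of a negative
-- yields '-…'/'b…' characters that int(a) rejects).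
def Pre_Max2870_Reg0 (Constant_Register0 : List Int) (Destination_Value : Int) (Packet7 : List Int) : Prop :=
  6 ≤ Constant_Register0.length ∧ 0 ≤ Constant_Register0.getD 1 0 ∧ 0 ≤ Constant_Register0.getD 2 0
instance (Constant_Register0 : List Int) (Destination_Value : Int) (Packet7 : List Int) : Decidable (Pre_Max2870_Reg0 Constant_Register0 Destination_Value Packet7) := by unfold Pre_Max2870_Reg0; infer_instance

def pvWitness_Max2870_Reg0 : List Int × Int × List Int := ([1, 5, 3, 0, 1, 1], 7, [9])

def Spec_Max2870_Reg0 (Constant_Register0 : List Int) (Destination_Value : Int) (Packet7 : List Int) (out : List Int) : Prop := out = Max2870_Reg0_alt Constant_Register0 Destination_Value Packet7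
instance (Constant_Register0 : List Int) (Destination_Value : Int) (Packet7 : List Int) (out : List Int) : Decidable (Spec_Max2870_Reg0 Constant_Register0 Destination_Value Packet7 out) := by unfold Spec_Max2870_Reg0; infer_instance

-- ===== CLAIM (what is proved, stated in full; the proofs are below) =====
def Claim_equal_Max2870_Reg0 : Prop := ∀ (Constant_Register0 : List Int) (Destination_Value : Int) (Packet7 : List Int), Dom_Max2870_Reg0 Constant_Register0 Destination_Value Packet7 → Pre_Max2870_Reg0 Constant_Register0 Destination_Value Packet7 → Spec_Max2870_Reg0 Constant_Register0 Destination_Value Packet7 (Max2870_Reg0 Constant_Register0 Destination_Value Packet7)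

-- ===== LEMMAS AND PROOFS =====

-- reversed binary digits read out the bits: (bin digits of n).reverse[x] = n / 2^x % 2
theorem pvBinDigits_rev_getD (n : Nat) : ∀ x : Nat, (pvBinDigits n).reverse.getD x 0 = n / 2 ^ x % 2 := by
  induction n using pvBinDigits.induct with
  | case1 => intro x; simp [pvBinDigits, Nat.zero_div]
  | case2 n ih =>
    intro x
    rw [pvBinDigits]
    cases x with
    | zero => simp
    | succ x =>
      simp only [List.reverse_append, List.reverse_cons, List.reverse_nil, List.nil_append,
        List.cons_append, List.getD_cons_succ]
      rw [ih x, Nat.pow_succ, ← Nat.div_div_eq_div_mul, Nat.div_div_eq_div_mul, Nat.mul_comm]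
      rw [Nat.div_div_eq_div_mul]

theorem pvBinDigits_bound (n : Nat) : n < 2 ^ (pvBinDigits n).length := by
  induction n using pvBinDigits.induct with
  | case1 => simp [pvBinDigits]
  | case2 n ih =>
    rw [pvBinDigits]
    simp only [List.length_append, List.length_singleton]
    have h2 := Nat.div_add_mod (n + 1) 2
    have : (n + 1) / 2 < 2 ^ (pvBinDigits ((n + 1) / 2)).length := ih
    rw [Nat.pow_succ]
    omega

-- getD with default 0 of a list of zeros is 0
theorem pvGetDZero (l : List Nat) (hl : ∀ a ∈ l, a = 0) (x : Nat) : l.getD x 0 = 0 := by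
  induction l generalizing x with
  | nil => simp
  | cons a t ih =>
    cases x with
    | zero => simpa using hl a (by simp)
    | succ x => exact ih (fun b hb => hl b (by simp [hb])) x

-- the zfilled, reversed digit list still reads out the bits
theorem pvZfill_rev_getD (n : Nat) (x : Nat) :
    (pvZfill16 (pvPyBinDigits n)).reverse.getD x 0 = n / 2 ^ x % 2 := by
  unfold pvZfill16 pvPyBinDigits
  rw [List.reverse_append]
  by_cases h0 : n = 0
  · subst h0
    rw [Nat.zero_div, Nat.zero_mod]
    refine pvGetDZero _ (fun a ha => ?_) x
    simp at ha
    tauto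
  · rw [if_neg h0]
    rcases Nat.lt_or_ge x (pvBinDigits n).length with hx | hx
    · rw [List.getD_append _ _ _ _ (by simpa using hx)]
      exact pvBinDigits_rev_getD n x
    · have hn : n < 2 ^ x := lt_of_lt_of_le (pvBinDigits_bound n) (Nat.pow_le_pow_right (by norm_num) hx)
      rw [Nat.div_eq_of_lt hn, Nat.zero_mod]
      rw [List.getD_append_right _ _ _ _ (by simpa using hx)]
      refine pvGetDZero _ (fun a ha => ?_) _
      simp only [List.mem_reverse, List.mem_replicate] at ha
      exact ha.2

-- folding the MSB-first k-bit list of n accumulates acc * 2^k + n % 2^k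
theorem pvFoldBits (n : Nat) : ∀ (k : Nat) (acc : Nat),
    (((List.range k).map (fun x => n / 2 ^ x % 2)).reverse).foldl (fun a b => a * 2 + b) acc
      = acc * 2 ^ k + n % 2 ^ k := by
  intro k
  induction k with
  | zero => intro acc; simp [Nat.mod_one]
  | succ k ih =>
    intro acc
    rw [List.range_succ, List.map_append, List.reverse_append]
    simp only [List.map_cons, List.map_nil, List.reverse_cons, List.reverse_nil, List.nil_append,
      List.cons_append, List.foldl_cons]
    rw [ih]
    have hmul : n % (2 ^ k * 2) = n % 2 ^ k + 2 ^ k * (n / 2 ^ k % 2) := Nat.mod_mul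
    rw [Nat.pow_succ, hmul]
    ring

-- (if c then [a] else [b]) = [if c then a else b]
theorem pvIfSingleton {α : Type} (c : Prop) [Decidable c] (a b : α) :
    (if c then [a] else [b]) = [if c then a else b] := by split_ifs <;> rfl

-- the Boolean round-trip '(if c then True else False) == True' is just c
theorem pvIfBool (c : Prop) [Decidable c] : ((if c then true else false) = true) = c := by
  by_cases h : c <;> simp [h]

-- the closed form of A's packed value
theorem pvValueEq (i1 i4 i5 i6 : Nat) (r1 r2 : Nat) :
    ((([i1] ++ ((List.range 16).map (fun x => r1 / 2 ^ x % 2)).reverse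
        ++ ((List.range 12).map (fun x => r2 / 2 ^ x % 2)).reverse
        ++ [i4] ++ [i5] ++ [i6])).foldl (fun a b => a * 2 + b) 0)
      = i1 * 2 ^ 31 + r1 % 2 ^ 16 * 2 ^ 15 + r2 % 2 ^ 12 * 2 ^ 3 + i4 * 2 ^ 2 + i5 * 2 + i6 := by
  simp only [List.foldl_append, List.foldl_cons, List.foldl_nil]
  rw [pvFoldBits r1 16, pvFoldBits r2 12]
  ring

-- getD on a map over a range reads off the function
theorem pvGetDMapRange {α : Type} (f : Nat → α) (n x : Nat) (d : α) (h : x < n) :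
    ((List.range n).map f).getD x d = f x := by
  rw [List.getD_eq_getElem?_getD, List.getElem?_map, List.getElem?_range h]
  rfl

-- reading a length-n list back out by index over range n
theorem pvRangeMapGetD {α β : Type} (l : List α) (d : α) (g : α → β) (n : Nat)
    (h : l.length = n) : (List.range n).map (fun x => g (l.getD x d)) = l.map g := by
  subst h
  apply List.ext_getElem
  · simp
  · intro i h1 h2
    simp only [List.getElem_map, List.getElem_range]
    rw [List.getD_eq_getElem _ _ (by simpa using h1)]

theorem Max2870_Reg0_eq (C : List Int) (D : Int) (P : List Int)
    (hpre : Pre_Max2870_Reg0 C D P) :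
    Max2870_Reg0 C D P = Max2870_Reg0_alt C D P := by
  obtain ⟨hlen, h1, h2⟩ := hpre
  unfold Max2870_Reg0 Max2870_Reg0_alt
  simp only [pvIfSingleton]
  rw [PySem.List.foldl_append_singleton_eq_map, PySem.List.foldl_append_singleton_eq_map,
    PySem.List.foldl_append_singleton_eq_map, PySem.List.foldl_append_singleton_eq_map]
  simp only [List.nil_append, pvZfill_rev_getD]
  -- element3Temp1: indices 0..11 into the 16-entry map
  rw [List.map_congr_left (l := List.range 12)
    (f := fun x => ((List.range 16).map fun x =>
      if (PySem.List.pyGetD C 2 0).toNat / 2 ^ x % 2 = 1 then true else false).getD x false)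
    (g := fun x => if (PySem.List.pyGetD C 2 0).toNat / 2 ^ x % 2 = 1 then true else false)
    (fun x hx => pvGetDMapRange _ 16 x false (by simp at hx; omega))]
  -- the final 32-entry readout loop is just a map over the 32-element list
  rw [pvRangeMapGetD _ false (fun b => if b = true then (1 : Nat) else 0) 32 (by simp)]
  -- push the Bool→Nat map through the concatenation and the reverses
  simp only [List.map_append, List.map_reverse, List.map_map, Function.comp_def, apply_ite,
    List.map_cons, List.map_nil, if_true]
  -- each bit value: if (bit = 1) then 1 else 0 = bit
  rw [List.map_congr_left (l := List.range 16)
    (g := fun x => (PySem.List.pyGetD C 1 0).toNat / 2 ^ x % 2)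
    (fun x _ => by
      by_cases h : (PySem.List.pyGetD C 1 0).toNat / 2 ^ x % 2 = 1
      · simp [h]
      · simp only [h, if_false, Bool.false_eq_true]; omega),
    List.map_congr_left (l := List.range 12)
    (g := fun x => (PySem.List.pyGetD C 2 0).toNat / 2 ^ x % 2)
    (fun x _ => by
      by_cases h : (PySem.List.pyGetD C 2 0).toNat / 2 ^ x % 2 = 1
      · simp [h]
      · simp only [h, if_false, Bool.false_eq_true]; omega)]
  simp only [pvIfBool]
  rw [pvValueEq]
  have hg1 : PySem.List.pyGetD C 1 0 = C.getD 1 0 := by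
    rw [PySem.List.pyGetD_eq_getElem C 0 (by norm_num) (by omega),
      List.getD_eq_getElem _ _ (by omega)]
    norm_num
  have hg2 : PySem.List.pyGetD C 2 0 = C.getD 2 0 := by
    rw [PySem.List.pyGetD_eq_getElem C 0 (by norm_num) (by omega),
      List.getD_eq_getElem _ _ (by omega)]
    congr 1
  rw [PySem.Int.mod_eq_emod_of_pos (by norm_num), PySem.Int.mod_eq_emod_of_pos (by norm_num),
    hg1, hg2]
  simp only [List.append_cancel_left_eq, List.cons.injEq, and_true, true_and]
  push_cast
  split_ifs <;> omega

-- ===== VERDICT (by name: the statement is the Claim_ definition above) =====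
theorem Max2870_Reg0_spec : Claim_equal_Max2870_Reg0 := by
  intro C D P _ hpre
  unfold Spec_Max2870_Reg0
  exact Max2870_Reg0_eq C D P hpre
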